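-- pv_equiv track=rewrite | github.com/Omkar02/FAANG | MN_Practice.py | findAllSubString
-- ===== SOURCE A (Python) =====
-- def findAllSubString(string):
--     ans = []
--     n = len(string)
--     for i in range(n):
--         for j in range(i + 1, n + 1):
--             ans.append(string[i:j])
--     ans = sorted(ans, key=lambda a: len(a))
--     def x(a): return [c[::-1] for c in a]
--     return ans, x(ans)
-- ===== SOURCE B (Python) =====
-- def findAllSubString(string):
--     ans = []
--     cur = list(string)
--     rest = string[1:]
--     while cur:
--         ans += cur
--         cur = [p + c for p, c in zip(cur, rest)]
--         rest = rest[1:]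
--     rev = [s[::-1] for s in ans]
--     return ans, rev
-- ===== Notes on version B (the rewrite author's own statement) =====
-- stated objective: alternative
-- what changed: B builds each length's substrings incrementally by extending the previous length's list one character via zip (no slicing, no sort), emitting lengths in ascending order, so A's sort disappears; the reversed list is a comprehension over the result.
import Mathlib
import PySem

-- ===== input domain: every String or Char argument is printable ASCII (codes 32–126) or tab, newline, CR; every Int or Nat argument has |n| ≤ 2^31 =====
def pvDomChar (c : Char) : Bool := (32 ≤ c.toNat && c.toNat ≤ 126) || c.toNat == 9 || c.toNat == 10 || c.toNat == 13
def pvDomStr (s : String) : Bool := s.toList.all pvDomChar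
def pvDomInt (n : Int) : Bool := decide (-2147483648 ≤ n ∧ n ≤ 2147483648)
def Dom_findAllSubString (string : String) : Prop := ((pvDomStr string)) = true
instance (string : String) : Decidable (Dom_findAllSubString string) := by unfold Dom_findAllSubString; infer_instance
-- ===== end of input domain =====

-- B replaces A's generate-then-sort with incremental extension of substrings length by length; equal return value, no side effects involved.

-- ===== PORT A =====
def findAllSubString (string : String) : List String × List String :=
  let n : Int := PySem.Str.len string
  let ans : List String :=
    (PySem.List.pyRange 0 n 1).foldl (fun ans i =>
      (PySem.List.pyRange (i + 1) (n + 1) 1).foldl (fun ans j =>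
        ans ++ [PySem.Str.slice string (some i) (some j)]) ans) []
  let ans := PySem.List.sorted ans (fun a => PySem.Str.len a) false
  (ans, ans.map (fun c => (PySem.Str.slice? c none none (-1)).getD c))

-- ===== PORT B =====
-- the 'while cur:' loop of Source B; Python's zip(cur, rest) pairs a string with a 1-char
-- string and 'p + c' appends it, which is exactly String.push of the paired Char
def pvExtendLoop (cur : List String) (rest : List Char) (ans : List String) : List String :=
  if h : cur = [] then ans
  else pvExtendLoop ((cur.zip rest).map (fun p => p.1.push p.2)) (rest.drop 1) (ans ++ cur)
termination_by cur.length + rest.length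
decreasing_by
  have hc : 0 < cur.length := List.length_pos_of_ne_nil h
  simp only [List.length_map, List.length_zip, List.length_drop]
  omega

def findAllSubString_alt (string : String) : List String × List String :=
  -- list(string): the 1-character strings
  let cur := string.toList.map (fun c => String.ofList [c])
  -- rest = string[1:]: a nonnegative slice start, exactly drop 1
  let rest := string.toList.drop 1
  let ans := pvExtendLoop cur rest []
  (ans, ans.map (fun s => (PySem.Str.slice? s none none (-1)).getD s))

-- ===== PRECONDITION & SPEC =====
def Spec_findAllSubString (string : String) (out : List String × List String) : Prop := out = findAllSubString_alt string
instance (string : String) (out : List String × List String) : Decidable (Spec_findAllSubString string out) := by unfold Spec_findAllSubString; infer_instance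

-- ===== CLAIM (what is proved, stated in full; the proofs are below) =====
def Claim_equal_findAllSubString : Prop := ∀ (string : String), Dom_findAllSubString string → Spec_findAllSubString string (findAllSubString string)

-- ===== LEMMAS AND PROOFS =====

-- the substring of t of length L starting at i
def winT (t : List Char) (L i : Nat) : String := String.ofList ((t.drop i).take L)

theorem insertBy_append_of_not_before {α : Type} (before : α → α → Bool) (x : α)
    (as bs : List α) (h : ∀ a ∈ as, before x a = false) :
    PySem.List.insertBy before x (as ++ bs) = as ++ PySem.List.insertBy before x bs := by
  induction as with
  | nil => rfl
  | cons a as ih =>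
    have ha : before x a = false := h a (List.mem_cons_self)
    simp only [List.cons_append, PySem.List.insertBy, ha, Bool.false_eq_true, if_false]
    rw [ih (fun a ha' => h a (List.mem_cons_of_mem _ ha'))]

theorem insertBy_cons_of_before {α : Type} (before : α → α → Bool) (x : α)
    (bs : List α) (h : ∀ b ∈ bs, before x b = true) :
    PySem.List.insertBy before x bs = x :: bs := by
  cases bs with
  | nil => rfl
  | cons b bs => simp only [PySem.List.insertBy, h b (List.mem_cons_self), if_true]

theorem foldl_insertBy_split {α : Type} (key : α → Int) (m : Int) :
    ∀ (xs accA accB : List α), (∀ a ∈ accA, key a = m) → (∀ b ∈ accB, m < key b) →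
      (∀ x ∈ xs, m ≤ key x) →
      xs.foldl (fun acc x => PySem.List.insertBy (fun a b => decide (key a < key b)) x acc) (accA ++ accB)
      = (accA ++ xs.filter (fun x => key x == m))
        ++ (xs.filter (fun x => key x != m)).foldl
             (fun acc x => PySem.List.insertBy (fun a b => decide (key a < key b)) x acc) accB := by
  intro xs
  induction xs with
  | nil => intro accA accB _ _ _; simp
  | cons x xs ih =>
    intro accA accB hA hB hx
    have hxm : m ≤ key x := hx x List.mem_cons_self
    by_cases hm : key x = m
    · have h1 : PySem.List.insertBy (fun a b => decide (key a < key b)) x (accA ++ accB)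
          = (accA ++ [x]) ++ accB := by
        rw [insertBy_append_of_not_before _ _ _ _ (fun a ha => by simp [hA a ha, hm]),
            insertBy_cons_of_before _ _ _ (fun b hb => by simp [hm]; exact hB b hb)]
        simp
      simp only [List.foldl_cons, h1, List.filter_cons]
      rw [ih (accA ++ [x]) accB
            (by intro a ha; rcases List.mem_append.1 ha with h | h
                · exact hA a h
                · simp at h; subst h; exact hm)
            hB (fun y hy => hx y (List.mem_cons_of_mem _ hy))]
      simp [hm, List.append_assoc]
    · have hlt : m < key x := lt_of_le_of_ne hxm (fun h => hm h.symm)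
      have h1 : PySem.List.insertBy (fun a b => decide (key a < key b)) x (accA ++ accB)
          = accA ++ PySem.List.insertBy (fun a b => decide (key a < key b)) x accB := by
        exact insertBy_append_of_not_before _ _ _ _ (fun a ha => by
          simp [hA a ha]; omega)
      simp only [List.foldl_cons, h1]
      rw [ih accA _ hA
            (by intro b hb
                rcases (PySem.List.mem_insertBy _ _ _ _).1 hb with h | h
                · subst h; exact hlt
                · exact hB b h)
            (fun y hy => hx y (List.mem_cons_of_mem _ hy))]
      simp [hm]

theorem sorted_extract {α : Type} (key : α → Int) (m : Int) (xs : List α)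
    (h : ∀ x ∈ xs, m ≤ key x) :
    PySem.List.sorted xs key false
      = xs.filter (fun x => key x == m)
        ++ PySem.List.sorted (xs.filter (fun x => key x != m)) key false := by
  rw [PySem.List.sorted_eq_foldl_insertBy, PySem.List.sorted_eq_foldl_insertBy]
  have := foldl_insertBy_split key m xs [] [] (by simp) (by simp) h
  simpa using this

theorem range_filter_eq_zero (m : Nat) (hm : 0 < m) :
    (List.range m).filter (fun d => d == 0) = [0] := by
  obtain ⟨k, rfl⟩ : ∃ k, m = k + 1 := ⟨m - 1, by omega⟩
  rw [List.range_succ_eq_map]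
  simp [List.filter_map, Function.comp_def]

theorem range_filter_ne_zero (k : Nat) :
    (List.range (k + 1)).filter (fun d => !(d == 0)) = (List.range k).map (· + 1) := by
  rw [List.range_succ_eq_map]
  simp [List.filter_map, Function.comp_def, Nat.succ_eq_add_one]

theorem tri_sorted {α : Type} (key : α → Int) :
    ∀ (n : Nat) (c : Int) (g : Nat → Nat → α),
      (∀ i d, i + d < n → key (g i d) = (d : Int) + c) →
      PySem.List.sorted ((List.range n).flatMap (fun i => (List.range (n - i)).map (g i))) key false
      = (List.range n).flatMap (fun l => (List.range (n - l)).map (fun i => g i l)) := by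
  intro n
  induction n with
  | zero => intro c g h; simp [PySem.List.sorted]
  | succ n ih =>
    intro c g h
    have hmem : ∀ x ∈ (List.range (n+1)).flatMap (fun i => (List.range (n + 1 - i)).map (g i)),
        c ≤ key x := by
      intro x hx
      simp only [List.mem_flatMap, List.mem_map, List.mem_range] at hx
      obtain ⟨i, hi, d, hd, rfl⟩ := hx
      rw [h i d (by omega)]; omega
    rw [sorted_extract key c _ hmem]
    have hfe : ((List.range (n+1)).flatMap (fun i => (List.range (n + 1 - i)).map (g i))).filter
          (fun x => key x == c)
        = (List.range (n+1)).map (fun i => g i 0) := by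
      rw [List.filter_flatMap]
      rw [List.flatMap_congr (g := fun i => [g i 0]) ?_]
      · exact List.map_eq_flatMap.symm
      · intro i hi
        simp only [List.mem_range] at hi
        rw [List.filter_map]
        have he : (List.range (n + 1 - i)).filter ((fun x => key x == c) ∘ g i)
            = (List.range (n + 1 - i)).filter (fun d => d == 0) := by
          apply List.filter_congr
          intro d hd
          simp only [List.mem_range] at hd
          simp only [Function.comp_apply, h i d (by omega)]
          by_cases hd0 : d = 0
          · subst hd0; simp
          · have h1 : ¬ ((d : Int) + c = c) := by omega
            simp only [beq_eq_false_iff_ne.2 h1, beq_eq_false_iff_ne.2 hd0]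
        rw [he, range_filter_eq_zero _ (by omega)]
        simp
    have hfn : ((List.range (n+1)).flatMap (fun i => (List.range (n + 1 - i)).map (g i))).filter
          (fun x => key x != c)
        = (List.range n).flatMap (fun i => (List.range (n - i)).map (fun d => g i (d + 1))) := by
      rw [List.filter_flatMap, List.range_succ, List.flatMap_append]
      have hlast : ([n].flatMap fun i => ((List.range (n + 1 - i)).map (g i)).filter (fun x => key x != c))
          = [] := by
        have h1 : n + 1 - n = 1 := by omega
        simp [h1, List.filter_map, Function.comp_def, h n 0 (by omega)]
      rw [hlast, List.append_nil]
      apply List.flatMap_congr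
      intro i hi
      simp only [List.mem_range] at hi
      rw [List.filter_map]
      have hn : (List.range (n + 1 - i)).filter ((fun x => key x != c) ∘ g i)
          = (List.range (n + 1 - i)).filter (fun d => !(d == 0)) := by
        apply List.filter_congr
        intro d hd
        simp only [List.mem_range] at hd
        simp only [Function.comp_apply, h i d (by omega)]
        by_cases hd0 : d = 0
        · subst hd0; simp
        · have h1 : ¬ ((d : Int) + c = c) := by omega
          simp only [bne, beq_eq_false_iff_ne.2 h1, beq_eq_false_iff_ne.2 hd0]
      rw [hn]
      have h2 : n + 1 - i = (n - i) + 1 := by omega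
      rw [h2, range_filter_ne_zero]
      simp [Function.comp_def]
    have hsplit : (List.range (n+1)).flatMap (fun l => (List.range (n + 1 - l)).map (fun i => g i l))
        = (List.range (n+1)).map (fun i => g i 0)
          ++ (List.range n).flatMap (fun l => (List.range (n - l)).map (fun i => g i (l + 1))) := by
      conv_lhs => rw [List.range_succ_eq_map]
      simp only [List.flatMap_cons, Nat.sub_zero, List.flatMap_map, Nat.succ_eq_add_one]
      congr 1
      apply List.flatMap_congr
      intro l hl
      simp only [List.mem_range] at hl
      have h3 : n + 1 - (l + 1) = n - l := by omega
      rw [h3]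
    rw [hfe, hfn]
    rw [ih (c + 1) (fun i d => g i (d + 1)) (by
      intro i d hid
      rw [h i (d + 1) (by omega)]
      push_cast; ring)]
    exact hsplit.symm

theorem lenSlice (s : String) (i d : Nat) (h : i + d < s.toList.length) :
    PySem.Str.len (PySem.Str.slice s (some (i : Int)) (some ((i : Int) + 1 + (d : Int)))) = (d : Int) + 1 := by
  rw [PySem.Str.len_eq, PySem.Str.toList_slice, PySem.Chars.slice_eq_listSlice]
  have h1 : (i : Int) + 1 + (d : Int) = (i : Int) + ((d + 1 : Nat) : Int) := by push_cast; ring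
  rw [h1, PySem.List.slice_natCast_add]
  simp only [List.length_take, List.length_drop]
  omega

theorem rawA_eq (s : String) :
    ((PySem.List.pyRange 0 (↑s.toList.length) 1).foldl (fun ans i =>
        (PySem.List.pyRange (i + 1) (↑s.toList.length + 1) 1).foldl (fun ans j =>
          ans ++ [PySem.Str.slice s (some i) (some j)]) ans) [])
    = (List.range s.toList.length).flatMap (fun i => (List.range (s.toList.length - i)).map
        (fun d : Nat => PySem.Str.slice s (some (i : Int)) (some ((i : Int) + 1 + (d : Int))))) := by
  rw [PySem.List.foldl_congr_mem _ _
      (fun ans i => ans ++ (PySem.List.pyRange (i + 1) (↑s.toList.length + 1) 1).map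
        (fun j => PySem.Str.slice s (some i) (some j))) _
      (fun acc x _ => PySem.List.foldl_append_singleton_eq_map _ _ _)]
  rw [PySem.List.foldl_append_eq_flatMap, List.nil_append]
  rw [PySem.List.pyRange_zero_natCast, List.flatMap_map]
  apply List.flatMap_congr
  intro i hi
  simp only [List.mem_range] at hi
  rw [PySem.List.pyRange_one]
  have h2 : ((↑s.toList.length + 1 - (↑i + 1) : Int)).toNat = s.toList.length - i := by omega
  rw [h2, List.map_map]
  apply List.map_congr_left
  intro d hd
  simp only [Function.comp_apply]

theorem slice_eq_winT (s : String) (i l : Nat) (h : i + l < s.toList.length) :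
    PySem.Str.slice s (some (i : Int)) (some ((i : Int) + 1 + (l : Int))) = winT s.toList (l + 1) i := by
  apply String.toList_inj.mp
  rw [PySem.Str.toList_slice, PySem.Chars.slice_eq_listSlice]
  have h1 : (i : Int) + 1 + (l : Int) = (i : Int) + ((l + 1 : Nat) : Int) := by push_cast; ring
  rw [h1, PySem.List.slice_natCast_add]
  simp [winT]

theorem extend_step (t : List Char) (m k : Nat) (hmk : m + 1 + k = t.length) :
    (((List.range (m + 1)).map (fun i => winT t (k + 1) i)).zip (t.drop (k + 1))).map
        (fun p => p.1.push p.2)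
      = (List.range m).map (fun i => winT t (k + 2) i) := by
  apply List.ext_getElem
  · simp only [List.length_map, List.length_zip, List.length_range, List.length_drop]
    omega
  · intro i h1 h2
    simp only [List.length_map, List.length_zip, List.length_range, List.length_drop] at h1
    simp only [List.getElem_map, List.getElem_zip, List.getElem_range, List.getElem_drop]
    apply String.toList_inj.mp
    rw [String.toList_push]
    simp only [winT, String.toList_ofList]
    have hi : i + (k + 1) < t.length := by omega
    have hlen : (t.drop i).length = t.length - i := List.length_drop
    have hget : (t.drop i)[k + 1]? = some t[k + 1 + i] := by
      rw [List.getElem?_drop, List.getElem?_eq_getElem (by omega)]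
      congr 2
      omega
    conv_rhs => rw [show k + 2 = k + 1 + 1 from rfl, List.take_add_one, hget]
    simp

theorem extendLoop_spec (t : List Char) : ∀ (m k : Nat) (ans : List String), m + k = t.length →
    pvExtendLoop ((List.range m).map (fun i => winT t (k + 1) i)) (t.drop (k + 1)) ans
    = ans ++ (List.range m).flatMap (fun j => (List.range (m - j)).map (fun i => winT t (k + 1 + j) i)) := by
  intro m
  induction m with
  | zero => intro k ans _; simp [pvExtendLoop]
  | succ m ih =>
    intro k ans hmk
    rw [pvExtendLoop]
    simp only [List.map_eq_nil_iff, List.range_eq_nil, dif_neg (by omega : ¬ m + 1 = 0)]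
    rw [extend_step t m k hmk]
    have hdrop : (t.drop (k + 1)).drop 1 = t.drop (k + 2) := by
      rw [List.drop_drop]
    rw [hdrop]
    have hk2 : k + 2 = (k + 1) + 1 := rfl
    rw [hk2, ih (k + 1) _ (by omega)]
    conv_rhs => rw [List.range_succ_eq_map]
    simp only [List.flatMap_cons, Nat.sub_zero, Nat.add_zero, List.flatMap_map]
    rw [List.append_assoc]
    congr 2
    apply List.flatMap_congr
    intro j hj
    have h3 : m + 1 - j.succ = m - j := by omega
    have h4 : k + 1 + j.succ = k + 1 + 1 + j := by omega
    rw [h3, h4]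


theorem init_cur (t : List Char) :
    t.map (fun c => String.ofList [c]) = (List.range t.length).map (fun i => winT t 1 i) := by
  apply List.ext_getElem
  · simp
  · intro i h1 h2
    simp only [List.length_map] at h1
    simp only [List.getElem_map, List.getElem_range, winT]
    congr 1
    rw [List.take_one, List.head?_drop, List.getElem?_eq_getElem h1]
    rfl

theorem findAllSubString_eq (s : String) :
    findAllSubString s = findAllSubString_alt s := by
  simp only [findAllSubString, findAllSubString_alt]
  rw [PySem.Str.len_eq s]
  have hB : pvExtendLoop (s.toList.map (fun c => String.ofList [c])) (s.toList.drop 1) []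
      = (List.range s.toList.length).flatMap (fun j => (List.range (s.toList.length - j)).map
          (fun i => winT s.toList (1 + j) i)) := by
    rw [init_cur s.toList]
    have h0 : (1 : Nat) = 0 + 1 := rfl
    rw [h0, (by rfl : s.toList.drop 1 = s.toList.drop (0 + 1))]
    rw [extendLoop_spec s.toList s.toList.length 0 [] (by omega)]
    simp
  have hA : PySem.List.sorted
        ((PySem.List.pyRange 0 (↑s.toList.length) 1).foldl (fun ans i =>
          (PySem.List.pyRange (i + 1) (↑s.toList.length + 1) 1).foldl (fun ans j =>
            ans ++ [PySem.Str.slice s (some i) (some j)]) ans) [])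
        (fun a => PySem.Str.len a) false
      = (List.range s.toList.length).flatMap (fun l => (List.range (s.toList.length - l)).map
          (fun i => winT s.toList (1 + l) i)) := by
    rw [rawA_eq s]
    rw [tri_sorted _ s.toList.length 1 _ (fun i d hid => lenSlice s i d hid)]
    apply List.flatMap_congr
    intro l hl
    simp only [List.mem_range] at hl
    apply List.map_congr_left
    intro i hi
    simp only [List.mem_range] at hi
    rw [slice_eq_winT s i l (by omega)]
    congr 1
    omega
  rw [hA, hB]

-- ===== VERDICT (by name: the statement is the Claim_ definition above) =====
theorem findAllSubString_spec : Claim_equal_findAllSubString := by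
  intro s _
  show _ = _
  exact findAllSubString_eq s
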